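-- pv_equiv track=rewrite | github.com/magicmayonaise/Connectomics | src/cx_connectome/projection.py | classify_projection_targets
-- ===== SOURCE A (Python) =====
-- from typing import Any, Iterable, List, Mapping, MutableMapping, Optional, Sequence, Set
--
-- CENTRAL_COMPLEX_NEUROPILS: Set[str] = {"PB", "EB", "FB", "NO"}
--
-- PROJECTION_NEUROPILS: Set[str] = {"SMP", "SLP", "LH", "LAL"}
--
-- def classify_projection_targets(neuropils: Iterable[str]) -> str:
--     """Return ``local_cx`` if all neuropils are within the central complex.
--
--     Parameters
--     ----------
--     neuropils:
--         Iterable of neuropil labels associated with presynaptic outputs.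
--
--     Returns
--     -------
--     str
--         Either ``"local_cx"`` or ``"projection"``.  If no neuropil information is
--         available the neuron is conservatively labelled as ``"projection"``.
--     """
--
--     neuropil_set = {label.upper() for label in neuropils if label}
--     if not neuropil_set:
--         return "projection"
--     if neuropil_set & PROJECTION_NEUROPILS:
--         return "projection"
--     if neuropil_set.issubset(CENTRAL_COMPLEX_NEUROPILS):
--         return "local_cx"
--     return "projection"
-- ===== SOURCE B (Python) =====
-- CENTRAL_COMPLEX_NEUROPILS = {"PB", "EB", "FB", "NO"}
--
-- PROJECTION_NEUROPILS = {"SMP", "SLP", "LH", "LAL"}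
--
--
-- def classify_projection_targets(neuropils):
--     """Single pass with two flags instead of building an intermediate set."""
--     seen_any = False
--     all_in_cx = True
--     for label in neuropils:
--         if label:
--             seen_any = True
--             in_cx = label.upper() in CENTRAL_COMPLEX_NEUROPILS
--             all_in_cx = all_in_cx and in_cx
--     return "local_cx" if seen_any and all_in_cx else "projection"
-- ===== Notes on version B (the rewrite author's own statement) =====
-- stated objective: simpler
-- what changed: B replaces the set comprehension plus three set queries (emptiness, intersection with PROJECTION_NEUROPILS, subset of CENTRAL_COMPLEX_NEUROPILS) by one pass maintaining two booleans, using that the two constant sets are disjoint so the intersection branch is redundant.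
import Mathlib
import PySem

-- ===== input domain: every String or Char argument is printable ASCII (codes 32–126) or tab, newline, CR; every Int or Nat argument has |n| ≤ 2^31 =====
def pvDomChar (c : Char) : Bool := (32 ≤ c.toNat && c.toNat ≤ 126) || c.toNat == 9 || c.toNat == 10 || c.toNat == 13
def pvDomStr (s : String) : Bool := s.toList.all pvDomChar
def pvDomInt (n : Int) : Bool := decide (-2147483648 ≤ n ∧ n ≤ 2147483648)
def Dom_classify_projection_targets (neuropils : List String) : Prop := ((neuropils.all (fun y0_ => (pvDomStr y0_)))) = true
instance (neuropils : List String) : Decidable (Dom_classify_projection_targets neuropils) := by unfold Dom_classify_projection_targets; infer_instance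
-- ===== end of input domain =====

-- B replaces A's set comprehension + three set queries by a single pass with two boolean
-- flags (simpler; the disjointness of the two constant sets makes A's intersection branch redundant).

-- ===== PORT A =====
def CENTRAL_COMPLEX_NEUROPILS : PySem.Set String := PySem.Set.ofList ["PB", "EB", "FB", "NO"]

def PROJECTION_NEUROPILS : PySem.Set String := PySem.Set.ofList ["SMP", "SLP", "LH", "LAL"]

def classify_projection_targets (neuropils : List String) : String :=
  -- {label.upper() for label in neuropils if label}
  let neuropil_set : PySem.Set String :=
    PySem.Set.ofList ((neuropils.filter (fun label => label ≠ "")).map PySem.Str.upper)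
  if neuropil_set = [] then "projection"
  else if PySem.Set.inter neuropil_set PROJECTION_NEUROPILS ≠ [] then "projection"
  else if PySem.Set.issubset neuropil_set CENTRAL_COMPLEX_NEUROPILS then "local_cx"
  else "projection"

-- ===== PORT B =====
def classify_projection_targets_alt (neuropils : List String) : String :=
  let p : Bool × Bool := neuropils.foldl
    (fun (p : Bool × Bool) label =>
      if label ≠ "" then
        let in_cx := PySem.Set.contains CENTRAL_COMPLEX_NEUROPILS (PySem.Str.upper label)
        (true, p.2 && in_cx)
      else p)
    (false, true)
  if p.1 && p.2 then "local_cx" else "projection"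

-- ===== PRECONDITION & SPEC =====
def Spec_classify_projection_targets (neuropils : List String) (out : String) : Prop := out = classify_projection_targets_alt neuropils
instance (neuropils : List String) (out : String) : Decidable (Spec_classify_projection_targets neuropils out) := by unfold Spec_classify_projection_targets; infer_instance

-- ===== CLAIM (what is proved, stated in full; the proofs are below) =====
def Claim_equal_classify_projection_targets : Prop := ∀ (neuropils : List String), Dom_classify_projection_targets neuropils → Spec_classify_projection_targets neuropils (classify_projection_targets neuropils)

-- ===== LEMMAS AND PROOFS =====

-- B's fold computes "some truthy label" and "every truthy label's upper is in the CX set".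
theorem foldB_eq (xs : List String) (sa ac : Bool) :
    xs.foldl
      (fun (p : Bool × Bool) label =>
        if label ≠ "" then
          let in_cx := PySem.Set.contains CENTRAL_COMPLEX_NEUROPILS (PySem.Str.upper label)
          (true, p.2 && in_cx)
        else p)
      (sa, ac)
    = (sa || xs.any (fun l => l ≠ ""),
       ac && xs.all (fun l => l = "" || PySem.Set.contains CENTRAL_COMPLEX_NEUROPILS (PySem.Str.upper l))) := by
  induction xs generalizing sa ac with
  | nil => simp
  | cons x xs ih =>
    rw [List.foldl_cons]
    by_cases hx : x = ""
    · rw [if_neg (not_not_intro hx)]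
      refine (ih sa ac).trans ?_
      simp [hx]
    · rw [if_pos hx]
      refine (ih true (ac && PySem.Set.contains CENTRAL_COMPLEX_NEUROPILS (PySem.Str.upper x))).trans ?_
      simp [hx, Bool.and_assoc]

theorem mem_A_set (xs : List String) (y : String) :
    y ∈ PySem.Set.ofList ((xs.filter (fun label => label ≠ "")).map PySem.Str.upper)
      ↔ ∃ l ∈ xs, l ≠ "" ∧ PySem.Str.upper l = y := by
  simp [PySem.Set.mem_ofList]
  constructor
  · rintro ⟨l, ⟨hl, hne⟩, rfl⟩; exact ⟨l, hl, hne, rfl⟩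
  · rintro ⟨l, hl, hne, rfl⟩; exact ⟨l, ⟨hl, hne⟩, rfl⟩

-- The two constant neuropil sets are disjoint.
theorem cx_not_proj (y : String) (h : y ∈ CENTRAL_COMPLEX_NEUROPILS) :
    y ∉ PROJECTION_NEUROPILS := by
  have h' : y = "PB" ∨ y = "EB" ∨ y = "FB" ∨ y = "NO" := by
    simpa [CENTRAL_COMPLEX_NEUROPILS, PySem.Set.mem_ofList] using h
  rcases h' with rfl | rfl | rfl | rfl <;> decide

-- ===== VERDICT (by name: the statement is the Claim_ definition above) =====
theorem classify_projection_targets_spec : Claim_equal_classify_projection_targets := by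
  intro xs _
  unfold Spec_classify_projection_targets classify_projection_targets classify_projection_targets_alt
  rw [foldB_eq]
  simp only [Bool.false_or, Bool.true_and]
  set S := PySem.Set.ofList ((xs.filter (fun label => label ≠ "")).map PySem.Str.upper) with hS
  by_cases hany : xs.any (fun l => l ≠ "") = true
  · -- some truthy label exists, so S ≠ []
    obtain ⟨l0, hl0, hne0⟩ := by simpa using hany
    have hSne : ¬ S = [] := by
      intro h
      have := (mem_A_set xs (PySem.Str.upper l0)).2 ⟨l0, hl0, hne0, rfl⟩
      rw [← hS, h] at this; simp at this
    rw [if_neg hSne]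
    by_cases hall : xs.all (fun l => l = "" || PySem.Set.contains CENTRAL_COMPLEX_NEUROPILS (PySem.Str.upper l)) = true
    · -- every truthy upper is in CX: subset holds, intersection with PROJ empty
      have hcx : ∀ y ∈ S, y ∈ CENTRAL_COMPLEX_NEUROPILS := by
        intro y hy
        obtain ⟨l, hl, hne, rfl⟩ := (mem_A_set xs y).1 (hS ▸ hy)
        have := List.all_eq_true.1 hall l hl
        simpa [hne, PySem.Set.contains_iff] using this
      have hinter : S.inter PROJECTION_NEUROPILS = [] := by
        rw [List.eq_nil_iff_forall_not_mem]
        intro y hy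
        rw [PySem.Set.mem_inter] at hy
        exact cx_not_proj y (hcx y hy.1) hy.2
      have hsub : S.issubset CENTRAL_COMPLEX_NEUROPILS = true :=
        (PySem.Set.issubset_iff _ _).2 hcx
      rw [if_neg (not_not_intro hinter), if_pos hsub,
        if_pos (show (xs.any (fun l => l ≠ "") && xs.all
          (fun l => l = "" || PySem.Set.contains CENTRAL_COMPLEX_NEUROPILS (PySem.Str.upper l))) = true
          by rw [hany, hall]; rfl)]
    · -- some truthy label's upper is outside CX: A's subset test fails
      have hex : ∃ l ∈ xs, l ≠ "" ∧ ¬ (PySem.Set.contains CENTRAL_COMPLEX_NEUROPILS (PySem.Str.upper l) = true) := by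
        rcases (by simpa using hall : ∃ l ∈ xs, ¬ l = "" ∧ ¬ PySem.Str.upper l ∈ CENTRAL_COMPLEX_NEUROPILS) with ⟨l, hl, h1, h2⟩
        exact ⟨l, hl, h1, by simpa [PySem.Set.contains_iff] using h2⟩
      obtain ⟨l, hl, hne, hnc⟩ := hex
      have hmem : PySem.Str.upper l ∈ S := (mem_A_set xs _).2 ⟨l, hl, hne, rfl⟩
      have hnsub : ¬ S.issubset CENTRAL_COMPLEX_NEUROPILS = true := by
        intro h
        exact hnc ((PySem.Set.contains_iff _ _).2 ((PySem.Set.issubset_iff _ _).1 h _ hmem))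
      have hBneg : ¬ (xs.any (fun l => l ≠ "") && xs.all
          (fun l => l = "" || PySem.Set.contains CENTRAL_COMPLEX_NEUROPILS (PySem.Str.upper l))) = true := by
        simp only [Bool.and_eq_true, not_and]
        intro _ h; exact hall h
      rw [if_neg hBneg]
      by_cases hint : S.inter PROJECTION_NEUROPILS = []
      · rw [if_neg (not_not_intro hint), if_neg hnsub]
      · rw [if_pos hint]
  · -- no truthy label: S is empty, both return "projection"
    have hSnil : S = [] := by
      rw [hS, List.eq_nil_iff_forall_not_mem]
      intro y hy
      obtain ⟨l, hl, hne, _⟩ := (mem_A_set xs y).1 hy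
      exact hne (by simpa [hne] using (by simpa using hany : ∀ l ∈ xs, l = "") l hl)
    have hBneg : ¬ (xs.any (fun l => l ≠ "") && xs.all
        (fun l => l = "" || PySem.Set.contains CENTRAL_COMPLEX_NEUROPILS (PySem.Str.upper l))) = true := by
      simp only [Bool.and_eq_true, not_and]
      intro h; exact absurd h hany
    rw [if_pos hSnil, if_neg hBneg]
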